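-- pv_equiv track=rewrite | github.com/RascalTwo/DailyProblem | problems/DailyCoding/028/solve.py | justify_words
-- ===== SOURCE A (Python) =====
-- from typing import List
--
-- def justify_words(words: List[str], width: int) -> str:
-- 	extra_spaces = width - len(' '.join(words))
-- 	if len(words) == 1:
-- 		return ' ' * extra_spaces + words[0]
--
-- 	i = 0
-- 	for _ in range(extra_spaces):
-- 		words[i] += ' '
-- 		i = (i + 1) % (len(words) - 1)
-- 	return ' '.join(words)
-- ===== SOURCE B (Python) =====
-- from typing import List
--
-- def justify_words(words: List[str], width: int) -> str:
-- 	extra = width - (sum(map(len, words)) + max(len(words) - 1, 0))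
-- 	if len(words) == 1:
-- 		return ' ' * extra + words[0]
-- 	gaps = len(words) - 1
-- 	if extra <= 0 or gaps <= 0:
-- 		return ' '.join(words)
-- 	q, r = divmod(extra, gaps)
-- 	parts = [w + ' ' * (q + (i < r)) for i, w in enumerate(words[:-1])]
-- 	parts.append(words[-1])
-- 	return ' '.join(parts)
-- ===== Notes on version B (the rewrite author's own statement) =====
-- stated objective: alternative
-- what changed: A appends one space per loop iteration, cycling through the gaps width-len(joined) times; B computes each gap's space count in closed form with one divmod and builds every padded word once.
import Mathlib
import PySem

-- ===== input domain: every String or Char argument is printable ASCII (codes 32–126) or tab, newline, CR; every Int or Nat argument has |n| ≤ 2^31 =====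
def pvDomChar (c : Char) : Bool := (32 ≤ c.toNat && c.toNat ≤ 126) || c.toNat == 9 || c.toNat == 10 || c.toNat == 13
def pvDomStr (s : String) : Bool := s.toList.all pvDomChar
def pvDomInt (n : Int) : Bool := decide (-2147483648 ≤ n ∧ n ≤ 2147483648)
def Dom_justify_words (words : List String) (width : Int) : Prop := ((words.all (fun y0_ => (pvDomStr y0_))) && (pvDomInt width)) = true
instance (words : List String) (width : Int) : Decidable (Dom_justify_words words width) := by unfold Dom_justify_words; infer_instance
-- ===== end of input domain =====

-- B replaces A's one-space-at-a-time round-robin padding loop by a closed-form divmod split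
-- of the padding over the gaps, building each padded word once (alternative algorithm).
-- NOTE: Python A mutates `words` in place (appends spaces to its elements); the equivalence
-- proved here is about the RETURN value only — B does not mutate its argument.

-- ===== PORT A =====
-- literal transliteration of A; the loop state is (words, i); st.2 is never negative where the
-- loop runs under Pre_ (i starts at 0 and `%` by the positive len(words)-1 stays ≥ 0), so .toNat is exact there
def justify_words (words : List String) (width : Int) : String :=
  let extra_spaces := width - PySem.Str.len (PySem.Str.join " " words)
  if words.length = 1 then
    String.ofList (PySem.List.pyRepeat [' '] extra_spaces) ++ PySem.List.pyGetD words 0 ""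
  else
    let fin := (PySem.List.pyRange 0 extra_spaces 1).foldl
      (fun (st : List String × Int) _ =>
        let ws := st.1.set st.2.toNat (PySem.List.pyGetD st.1 st.2 "" ++ " ")
        (ws, PySem.Int.mod (st.2 + 1) ((ws.length : Int) - 1)))
      (words, 0)
    PySem.Str.join " " fin.1

-- ===== PORT B =====
def justify_words_alt (words : List String) (width : Int) : String :=
  let extra := width - ((words.map PySem.Str.len).sum + max ((words.length : Int) - 1) 0)
  if words.length = 1 then
    String.ofList (PySem.List.pyRepeat [' '] extra) ++ PySem.List.pyGetD words 0 ""
  else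
    let gaps := (words.length : Int) - 1
    if extra ≤ 0 ∨ gaps ≤ 0 then PySem.Str.join " " words
    else
      let q := PySem.Int.floordiv extra gaps
      let r := PySem.Int.mod extra gaps
      let parts := (PySem.List.enumerate (PySem.List.slice words none (some (-1)))).map
        (fun p => p.2 ++ String.ofList (PySem.List.pyRepeat [' '] (q + (if p.1 < r then 1 else 0))))
      PySem.Str.join " " (parts ++ [PySem.List.pyGetD words (-1) ""])

-- ===== PRECONDITION & SPEC =====
-- Pre_ excludes exactly the inputs where A raises: words = [] with width > 0 (IndexError on words[0] in the loop)
def Pre_justify_words (words : List String) (width : Int) : Prop := words = [] → width ≤ 0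
instance (words : List String) (width : Int) : Decidable (Pre_justify_words words width) := by unfold Pre_justify_words; infer_instance
def pvWitness_justify_words : List String × Int := (["ab", "c"], 8)

def Spec_justify_words (words : List String) (width : Int) (out : String) : Prop := out = justify_words_alt words width
instance (words : List String) (width : Int) (out : String) : Decidable (Spec_justify_words words width out) := by unfold Spec_justify_words; infer_instance

-- ===== CLAIM (what is proved, stated in full; the proofs are below) =====
def Claim_equal_justify_words : Prop := ∀ (words : List String) (width : Int), Dom_justify_words words width → Pre_justify_words words width → Spec_justify_words words width (justify_words words width)


-- ===== LEMMAS AND PROOFS =====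

-- proof-side helpers
def padStr (c : Nat) : String := String.ofList (List.replicate c ' ')

def cntk (g k i : Nat) : Nat := k / g + (if i < k % g then 1 else 0)

def distK (ws : List String) (g k : Nat) : List String :=
  ws.mapIdx (fun i w => if i < g then w ++ padStr (cntk g k i) else w)

def stepA (st : List String × Int) : List String × Int :=
  let ws := st.1.set st.2.toNat (PySem.List.pyGetD st.1 st.2 "" ++ " ")
  (ws, PySem.Int.mod (st.2 + 1) ((ws.length : Int) - 1))

theorem foldl_const_iterate {α β : Type} (f : α → α) (l : List β) (init : α) :
    l.foldl (fun a _ => f a) init = f^[l.length] init := by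
  induction l generalizing init with
  | nil => rfl
  | cons x xs ih => simpa [List.foldl, Function.iterate_succ_apply] using ih (f init)

theorem foldA (l : List Int) (init : List String × Int) :
    l.foldl (fun st _ =>
      let ws := st.1.set st.2.toNat (PySem.List.pyGetD st.1 st.2 "" ++ " ")
      (ws, PySem.Int.mod (st.2 + 1) ((ws.length : Int) - 1))) init = stepA^[l.length] init :=
  foldl_const_iterate stepA l init

theorem pyRange_len (e : Int) : (PySem.List.pyRange 0 e 1).length = e.toNat := by
  simp [PySem.List.pyRange]
  omega

theorem pyRange_nonpos (e : Int) (h : e ≤ 0) : PySem.List.pyRange 0 e 1 = [] := by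
  have hl : (PySem.List.pyRange 0 e 1).length = 0 := by rw [pyRange_len]; omega
  exact List.eq_nil_of_length_eq_zero hl

theorem pad_succ (c : Nat) : padStr c ++ " " = padStr (c + 1) := by
  apply String.toList_injective
  simp [padStr, List.replicate_succ']

theorem divmod_succ (g k : Nat) (hg : 0 < g) :
    (k + 1) / g = k / g + (if k % g + 1 = g then 1 else 0) ∧
    (k + 1) % g = if k % g + 1 = g then 0 else k % g + 1 := by
  obtain ⟨d, m, hm, rfl⟩ : ∃ d m, m < g ∧ k = m + g * d :=
    ⟨k / g, k % g, Nat.mod_lt _ hg, by rw [Nat.mod_add_div]⟩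
  have e1 : (m + g * d) % g = m := by rw [Nat.add_mul_mod_self_left, Nat.mod_eq_of_lt hm]
  have e2 : (m + g * d) / g = d := by rw [Nat.add_mul_div_left _ _ hg, Nat.div_eq_of_lt hm]; omega
  have e3 : m + g * d + 1 = (m + 1) + g * d := by ring
  rw [e1, e2, e3, Nat.add_mul_mod_self_left, Nat.add_mul_div_left _ _ hg]
  by_cases h : m + 1 = g
  · rw [if_pos h, if_pos h, h, Nat.mod_self, Nat.div_self hg]
    omega
  · have hlt : m + 1 < g := by omega
    rw [if_neg h, if_neg h, Nat.mod_eq_of_lt hlt, Nat.div_eq_of_lt hlt]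
    omega

theorem cnt_succ (g k i : Nat) (hg : 0 < g) (hi : i < g) :
    cntk g (k + 1) i = cntk g k i + (if i = k % g then 1 else 0) := by
  unfold cntk
  rw [(divmod_succ g k hg).1, (divmod_succ g k hg).2]
  have hm : k % g < g := Nat.mod_lt _ hg
  split_ifs <;> omega

theorem length_distK (ws : List String) (g k : Nat) : (distK ws g k).length = ws.length := by
  simp [distK]

theorem distK_zero (ws : List String) (g : Nat) : distK ws g 0 = ws := by
  apply List.ext_getElem (by simp [distK])
  intro j h1 h2
  simp [distK, cntk, padStr]

theorem iter_inv (ws : List String) (g : Nat) (hg : 0 < g) (hlen : ws.length = g + 1) (k : Nat) :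
    stepA^[k] (ws, 0) = (distK ws g k, ((k % g : Nat) : Int)) := by
  induction k with
  | zero => simp [distK_zero]
  | succ k ih =>
    rw [Function.iterate_succ_apply', ih]
    have hm : k % g < g := Nat.mod_lt _ hg
    have hmlen : k % g < (distK ws g k).length := by rw [length_distK]; omega
    have hget : PySem.List.pyGetD (distK ws g k) ((k % g : Nat) : Int) ""
        = ws[k % g]'(by omega) ++ padStr (cntk g k (k % g)) := by
      rw [PySem.List.pyGetD_natCast, List.getD_eq_getElem _ _ hmlen]
      simp [distK, hm]
    unfold stepA
    simp only [Int.toNat_natCast, List.length_set, length_distK, hlen]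
    rw [Prod.mk.injEq]
    refine ⟨?_, ?_⟩
    · apply List.ext_getElem (by simp [distK, List.length_set])
      intro j hj1 hj2
      rw [List.getElem_set]
      by_cases hjm : k % g = j
      · subst hjm
        rw [if_pos rfl, hget, String.append_assoc, pad_succ]
        simp only [distK, List.getElem_mapIdx]
        rw [if_pos hm, cnt_succ g k (k % g) hg hm, if_pos rfl]
      · rw [if_neg hjm]
        simp only [distK, List.getElem_mapIdx]
        by_cases hjg : j < g
        · rw [if_pos hjg, if_pos hjg, cnt_succ g k j hg hjg, if_neg (fun h => hjm h.symm)]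
          simp
        · rw [if_neg hjg, if_neg hjg]
    · have hcast : ((g + 1 : Nat) : Int) - 1 = (g : Int) := by push_cast; ring
      rw [hcast]
      have h1 : (((k % g : Nat) : Int) + 1) = ((k % g + 1 : Nat) : Int) := by push_cast; ring
      rw [h1, PySem.Int.mod_natCast]
      congr 1
      rw [(divmod_succ g k hg).2]
      by_cases h : k % g + 1 = g
      · rw [if_pos h, h, Nat.mod_self]
      · rw [if_neg h, Nat.mod_eq_of_lt (by omega)]

theorem enumerate_map {α β : Type} (l : List α) (s : Int) (f : Int × α → β) :
    (PySem.List.enumerate l s).map f = l.mapIdx (fun i a => f (s + (i : Int), a)) := by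
  induction l generalizing s with
  | nil => simp [PySem.List.enumerate]
  | cons x xs ih =>
    simp only [PySem.List.enumerate, List.map_cons, List.mapIdx_cons, ih]
    congr 1
    · norm_num
    · congr 1
      funext i a
      congr 2
      push_cast
      ring

theorem join_len_chars (parts : List (List Char)) (h : parts ≠ []) :
    (PySem.Chars.join [' '] parts).length = (parts.map List.length).sum + (parts.length - 1) := by
  induction parts with
  | nil => simp at h
  | cons p rest ih =>
    cases rest with
    | nil => simp [PySem.Chars.join_singleton]
    | cons q r =>
      rw [PySem.Chars.join_cons_cons]
      have h2 := ih (by simp)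
      simp only [List.length_append, h2, List.map_cons, List.sum_cons, List.length_cons,
        List.length_nil]
      omega

theorem sum_len_cast (l : List String) :
    ((l.map (fun x => x.toList.length)).sum : Int) = (l.map PySem.Str.len).sum := by
  induction l with
  | nil => simp
  | cons x xs ihx =>
    simp only [List.map_cons, List.sum_cons, PySem.Str.len_eq]
    omega

theorem extra_eq (words : List String) :
    PySem.Str.len (PySem.Str.join " " words) =
      (words.map PySem.Str.len).sum + max ((words.length : Int) - 1) 0 := by
  cases words with
  | nil => simp [PySem.Str.len_eq, PySem.Str.toList_join, PySem.Chars.join_nil]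
  | cons w rest =>
    rw [PySem.Str.len_eq, PySem.Str.toList_join]
    have hne : (w :: rest).map String.toList ≠ [] := by simp
    rw [show " ".toList = [' '] from rfl, join_len_chars _ hne]
    have hsum : (((w :: rest).map String.toList).map List.length).sum
        = ((w :: rest).map (fun x => x.toList.length)).sum := by rw [List.map_map]; rfl
    rw [hsum]
    have hB : ((w :: rest).map String.toList).length - 1 = rest.length := by simp
    rw [hB]
    have hsplit : ((((w :: rest).map (fun x => x.toList.length)).sum + rest.length : Nat) : Int)
        = (((w :: rest).map (fun x => x.toList.length)).sum : Int) + (rest.length : Int) := by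
      push_cast [List.map_map, Function.comp_def]; ring
    rw [hsplit, sum_len_cast]
    simp only [List.length_cons]
    omega

theorem main_equal : ∀ (words : List String) (width : Int), Pre_justify_words words width → justify_words words width = justify_words_alt words width := by
  intro words width hpre
  simp only [justify_words, justify_words_alt]
  rw [extra_eq words]
  set e : Int := width - ((words.map PySem.Str.len).sum + max ((words.length : Int) - 1) 0) with hedef
  clear_value e
  by_cases h1 : words.length = 1
  · rw [if_pos h1, if_pos h1]
  · rw [if_neg h1, if_neg h1]
    by_cases h0 : words = []
    · subst h0
      have hw : width ≤ 0 := hpre rfl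
      have he0 : e ≤ 0 := by simp [hedef]; omega
      rw [pyRange_nonpos _ he0, if_pos (Or.inr (by norm_num))]
      rfl
    · have hlen0 : words.length ≠ 0 := fun h => h0 (List.eq_nil_of_length_eq_zero h)
      have hn2 : 2 ≤ words.length := by omega
      have hg : 0 < words.length - 1 := by omega
      set g : Nat := words.length - 1 with hgdef
      clear_value g
      have hlen : words.length = g + 1 := by omega
      have hgi : ((words.length : Int) - 1) = (g : Int) := by rw [hlen]; push_cast; ring
      have hgpos : (0 : Int) < (g : Int) := by exact_mod_cast hg
      by_cases hE : e ≤ 0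
      · rw [pyRange_nonpos _ hE, if_pos (Or.inl hE)]
        rfl
      · replace hE : 0 < e := by omega
        rw [if_neg (by rw [hgi]; rintro (h | h) <;> omega)]
        rw [foldA, pyRange_len, iter_inv words g hg hlen e.toNat]
        set E : Nat := e.toNat with hEdef
        have heE : e = ((E : Nat) : Int) := by
          rw [hEdef]; exact (Int.toNat_of_nonneg (by omega)).symm
        clear_value E
        have hslice : PySem.List.slice words none (some (-1)) = words.dropLast := by simp [pysem]
        have hq : PySem.Int.floordiv e ((words.length : Int) - 1) = ((E / g : Nat) : Int) := by
          rw [hgi, heE]; exact PySem.Int.floordiv_natCast E g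
        have hr : PySem.Int.mod e ((words.length : Int) - 1) = ((E % g : Nat) : Int) := by
          rw [hgi, heE]; exact PySem.Int.mod_natCast E g
        rw [hslice, hq, hr, enumerate_map]
        congr 1
        apply List.ext_getElem (by simp [length_distK, List.length_mapIdx, List.length_dropLast]; omega)
        intro j hj1 hj2
        have hjn : j < words.length := by simpa [length_distK] using hj1
        simp only [distK, List.getElem_mapIdx]
        by_cases hjg : j < g
        · rw [List.getElem_append_left (by simp [List.length_mapIdx, List.length_dropLast]; omega)]
          rw [List.getElem_mapIdx, List.getElem_dropLast, if_pos hjg]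
          congr 1
          rw [PySem.List.pyRepeat_singleton]
          unfold padStr
          congr 2
          unfold cntk
          have h0 : (0 : Int) ≤ ((E / g : Nat) : Int) := Int.natCast_nonneg _
          have h1 : ((E / g : Nat) : Int).toNat = E / g := Int.toNat_natCast _
          split_ifs <;> omega
        · have hje : j = g := by omega
          rw [List.getElem_append_right (by simp [List.length_mapIdx, List.length_dropLast]; omega)]
          rw [if_neg hjg, List.getElem_singleton]
          have hlast : PySem.List.pyGetD words (-1) "" = (words[words.length - 1]?).getD "" := by
            unfold PySem.List.pyGetD PySem.List.pyGet? PySem.List.pyIdx?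
            rw [if_neg (by norm_num), if_pos (by omega)]
            norm_num
          rw [hlast, show words.length - 1 = j from by omega, List.getElem?_eq_getElem hjn]
          rfl

-- ===== VERDICT (by name: the statement is the Claim_ definition above) =====
theorem justify_words_spec : Claim_equal_justify_words := by
  intro words width _ hpre
  exact main_equal words width hpre
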